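-- pv_equiv track=rewrite | github.com/wongzc/NUS_IT5001_PE_answer | solution/IT5001 2023_24 SEM2 PE.py | splash
-- ===== SOURCE A (Python) =====
-- def splash(no_r,no_c,radius,actions):
--     ans=[]
--     for r in range(no_r):
--         row=[]
--         for c in range(no_c):
--             curr=which_paint(no_r,no_c,radius,r,c,actions)
--             row.append(curr)
--         ans.append(row)
--
--     return   ans
--
-- def which_paint(no_r,no_c,radius,r,c,actions):
--     ans='.'
--     for color,i,j in actions:
--         if (r-i)**2+(c-j)**2<=radius**2:
--             ans=color
--     return  ans
-- ===== SOURCE B (Python) =====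
-- def splash(no_r, no_c, radius, actions):
--     grid = [['.'] * no_c for _ in range(no_r)]
--     rad = abs(radius)
--     r2 = radius * radius
--     for color, i, j in actions:
--         for r in range(max(0, i - rad), min(no_r, i + rad + 1)):
--             dr2 = (r - i) ** 2
--             for c in range(max(0, j - rad), min(no_c, j + rad + 1)):
--                 if dr2 + (c - j) ** 2 <= r2:
--                     grid[r][c] = color
--     return grid
-- ===== Notes on version B (the rewrite author's own statement) =====
-- stated objective: faster
-- what changed: Instead of scanning the whole action list once per grid cell, B builds a '.'-filled grid once and paints each action's circle over its clipped bounding box in order, so later actions override earlier ones.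
import Mathlib
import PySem

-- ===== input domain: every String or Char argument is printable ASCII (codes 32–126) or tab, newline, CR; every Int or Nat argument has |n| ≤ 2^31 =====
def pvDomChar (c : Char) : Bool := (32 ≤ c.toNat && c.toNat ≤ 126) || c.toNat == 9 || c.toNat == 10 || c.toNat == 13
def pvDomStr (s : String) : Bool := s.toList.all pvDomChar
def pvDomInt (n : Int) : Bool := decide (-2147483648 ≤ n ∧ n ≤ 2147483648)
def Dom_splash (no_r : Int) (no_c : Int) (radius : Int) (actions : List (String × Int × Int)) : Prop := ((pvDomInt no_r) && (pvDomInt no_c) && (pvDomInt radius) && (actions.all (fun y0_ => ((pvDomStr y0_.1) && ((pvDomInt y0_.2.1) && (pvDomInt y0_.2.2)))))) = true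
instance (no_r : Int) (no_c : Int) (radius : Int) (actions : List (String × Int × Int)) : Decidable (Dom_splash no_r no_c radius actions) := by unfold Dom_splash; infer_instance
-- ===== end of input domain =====

-- B paints each action's circle over its clipped bounding box onto a '.'-filled grid
-- (later actions overwrite earlier ones) instead of scanning all actions per cell: faster.

-- ===== PORT A =====
def which_paint (_no_r : Int) (_no_c : Int) (radius : Int) (r : Int) (c : Int)
    (actions : List (String × Int × Int)) : String :=
  actions.foldl (fun ans a => if (r - a.2.1) ^ 2 + (c - a.2.2) ^ 2 ≤ radius ^ 2 then a.1 else ans) "."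

def splash (no_r : Int) (no_c : Int) (radius : Int) (actions : List (String × Int × Int)) : List (List String) :=
  (PySem.List.pyRange 0 no_r 1).foldl (fun ans r =>
    ans ++ [(PySem.List.pyRange 0 no_c 1).foldl (fun row c =>
      row ++ [which_paint no_r no_c radius r c actions]) []]) []

-- ===== PORT B =====
-- grid[r][c] = v; in B both indices are always ≥ 0 (ranges are clipped at max 0), so .toNat is exact
def setCell (g : List (List String)) (r : Nat) (c : Nat) (v : String) : List (List String) :=
  g.set r ((g.getD r []).set c v)

def paintOne (no_r : Int) (no_c : Int) (r2 : Int) (rad : Int) (color : String) (i : Int) (j : Int)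
    (g0 : List (List String)) : List (List String) :=
  (PySem.List.pyRange (max 0 (i - rad)) (min no_r (i + rad + 1)) 1).foldl (fun g r =>
    (PySem.List.pyRange (max 0 (j - rad)) (min no_c (j + rad + 1)) 1).foldl (fun g c =>
      if (r - i) ^ 2 + (c - j) ^ 2 ≤ r2 then setCell g r.toNat c.toNat color else g) g) g0

def splash_alt (no_r : Int) (no_c : Int) (radius : Int) (actions : List (String × Int × Int)) : List (List String) :=
  -- ['.'] * no_c for _ in range(no_r): negative sizes give empty, matched by .toNat clamping
  actions.foldl (fun g a => paintOne no_r no_c (radius * radius) |radius| a.1 a.2.1 a.2.2 g)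
    ((PySem.List.pyRange 0 no_r 1).map (fun _ => List.replicate no_c.toNat "."))

 -- ===== PRECONDITION & SPEC =====
def Spec_splash (no_r : Int) (no_c : Int) (radius : Int) (actions : List (String × Int × Int)) (out : List (List String)) : Prop := out = splash_alt no_r no_c radius actions
instance (no_r : Int) (no_c : Int) (radius : Int) (actions : List (String × Int × Int)) (out : List (List String)) : Decidable (Spec_splash no_r no_c radius actions out) := by unfold Spec_splash; infer_instance

-- ===== CLAIM (what is proved, stated in full; the proofs are below) =====
def Claim_equal_splash : Prop := ∀ (no_r : Int) (no_c : Int) (radius : Int) (actions : List (String × Int × Int)), Dom_splash no_r no_c radius actions → Spec_splash no_r no_c radius actions (splash no_r no_c radius actions)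


/-- read a cell with defaults (every read in the proofs is in bounds). -/
def gget (g : List (List String)) (r c : Nat) : String := (g.getD r []).getD c ""

lemma length_setCell (g : List (List String)) (r c : Nat) (v : String) :
    (setCell g r c v).length = g.length := by simp [setCell]

lemma rows_setCell {W : Nat} {g : List (List String)} (h : ∀ row ∈ g, row.length = W)
    (r c : Nat) (v : String) : ∀ row ∈ setCell g r c v, row.length = W := by
  by_cases hr : r < g.length
  · intro row hrow
    rcases List.mem_or_eq_of_mem_set hrow with hm | hm
    · exact h _ hm
    · subst hm
      rw [List.length_set]
      exact h _ (by rw [List.getD_eq_getElem _ _ hr]; exact g.getElem_mem hr)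
  · rw [show setCell g r c v = g from by
      simp [setCell, List.set_eq_of_length_le (Nat.le_of_not_lt hr)]]
    exact h

lemma gget_setCell (g : List (List String)) (r c : Nat) (v : String)
    (hr : r < g.length) (hc : c < (g.getD r []).length) (r' c' : Nat) :
    gget (setCell g r c v) r' c' = if r' = r ∧ c' = c then v else gget g r' c' := by
  by_cases h1 : r' = r
  · subst h1
    simp only [gget, setCell, List.getD_eq_getElem?_getD, List.getElem?_set, if_pos hr]
    by_cases h2 : c' = c
    · subst h2
      simp [← List.getD_eq_getElem?_getD, hc]
    · simp [← List.getD_eq_getElem?_getD, h2, Ne.symm h2]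
  · simp only [gget, setCell, List.getD_eq_getElem?_getD, List.getElem?_set,
      if_neg (Ne.symm h1), h1, false_and, if_false]

-- inner column loop of paintOne, over an arbitrary column list
lemma gget_foldl_cols (color : String) (i j r2 r : Int) (W : Nat) :
    ∀ (L : List Int) (g : List (List String)),
    (∀ row ∈ g, row.length = W) → (∀ c ∈ L, 0 ≤ c ∧ c < (W : Int)) →
    0 ≤ r → r.toNat < g.length →
    ∀ r' c' : Nat,
    gget (L.foldl (fun g c =>
        if (r - i) ^ 2 + (c - j) ^ 2 ≤ r2 then setCell g r.toNat c.toNat color else g) g) r' c'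
      = if r' = r.toNat ∧ (c' : Int) ∈ L ∧ (r - i) ^ 2 + ((c' : Int) - j) ^ 2 ≤ r2 then color
        else gget g r' c' := by
  intro L
  induction L with
  | nil => simp
  | cons c0 L ih =>
    intro g hrow hL hr hlen r' c'
    obtain ⟨hc0, hc0W⟩ := hL c0 (List.mem_cons_self ..)
    simp only [List.foldl_cons]
    have hcval : c0.toNat < (g.getD r.toNat []).length := by
      rw [hrow _ (by rw [List.getD_eq_getElem _ _ hlen]; exact g.getElem_mem hlen)]
      omega
    by_cases hp : (r - i) ^ 2 + (c0 - j) ^ 2 ≤ r2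
    · rw [if_pos hp,
        ih _ (rows_setCell hrow _ _ _) (fun c hc => hL c (List.mem_cons_of_mem _ hc)) hr
          (by rw [length_setCell]; exact hlen) r' c',
        gget_setCell g r.toNat c0.toNat color hlen hcval r' c']
      by_cases e1 : r' = r.toNat ∧ (c' : Int) ∈ L ∧ (r - i) ^ 2 + ((c' : Int) - j) ^ 2 ≤ r2
      · rw [if_pos e1, if_pos ⟨e1.1, List.mem_cons_of_mem _ e1.2.1, e1.2.2⟩]
      · rw [if_neg e1]
        by_cases e2 : r' = r.toNat ∧ c' = c0.toNat
        · have hcc : (c' : Int) = c0 := by omega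
          have hok : r' = r.toNat ∧ (c' : Int) ∈ c0 :: L ∧ (r - i) ^ 2 + ((c' : Int) - j) ^ 2 ≤ r2 :=
            ⟨e2.1, by rw [hcc]; exact List.mem_cons_self .., by rw [hcc]; exact hp⟩
          rw [if_pos e2, if_pos hok]
        · rw [if_neg e2, if_neg ?_]
          rintro ⟨ha, hb, hcnd⟩
          rcases List.mem_cons.1 hb with hb | hb
          · exact e2 ⟨ha, by omega⟩
          · exact e1 ⟨ha, hb, hcnd⟩
    · rw [if_neg hp, ih _ hrow (fun c hc => hL c (List.mem_cons_of_mem _ hc)) hr hlen r' c']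
      congr 1
      · rw [eq_iff_iff]
        constructor
        · rintro ⟨ha, hb, hcnd⟩
          exact ⟨ha, List.mem_cons_of_mem _ hb, hcnd⟩
        · rintro ⟨ha, hb, hcnd⟩
          refine ⟨ha, ?_, hcnd⟩
          rcases List.mem_cons.1 hb with hb | hb
          · exact absurd (by rw [hb] at hcnd; exact hcnd) hp
          · exact hb

lemma rows_foldl_cols {W : Nat} (color : String) (i j r2 r : Int) :
    ∀ (L : List Int) (g : List (List String)), (∀ row ∈ g, row.length = W) →
    ∀ row ∈ (L.foldl (fun g c =>
        if (r - i) ^ 2 + (c - j) ^ 2 ≤ r2 then setCell g r.toNat c.toNat color else g) g),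
      row.length = W := by
  intro L
  induction L with
  | nil => intro g h; simpa
  | cons c0 L ih =>
    intro g h
    simp only [List.foldl_cons]
    split
    · exact ih _ (rows_setCell h _ _ _)
    · exact ih _ h

lemma length_foldl_cols (color : String) (i j r2 r : Int) :
    ∀ (L : List Int) (g : List (List String)),
    (L.foldl (fun g c =>
        if (r - i) ^ 2 + (c - j) ^ 2 ≤ r2 then setCell g r.toNat c.toNat color else g) g).length
      = g.length := by
  intro L
  induction L with
  | nil => intro g; rfl
  | cons c0 L ih =>
    intro g
    simp only [List.foldl_cons]
    split
    · rw [ih, length_setCell]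
    · rw [ih]

lemma length_foldl_rows (color : String) (i j r2 : Int) (L : List Int) :
    ∀ (R : List Int) (g : List (List String)),
    (R.foldl (fun g r => L.foldl (fun g c =>
        if (r - i) ^ 2 + (c - j) ^ 2 ≤ r2 then setCell g r.toNat c.toNat color else g) g) g).length
      = g.length := by
  intro R
  induction R with
  | nil => intro g; rfl
  | cons r0 R ih => intro g; simp only [List.foldl_cons]; rw [ih, length_foldl_cols]

lemma rows_foldl_rows {W : Nat} (color : String) (i j r2 : Int) (L : List Int) :
    ∀ (R : List Int) (g : List (List String)), (∀ row ∈ g, row.length = W) →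
    ∀ row ∈ (R.foldl (fun g r => L.foldl (fun g c =>
        if (r - i) ^ 2 + (c - j) ^ 2 ≤ r2 then setCell g r.toNat c.toNat color else g) g) g),
      row.length = W := by
  intro R
  induction R with
  | nil => intro g h; simpa
  | cons r0 R ih =>
    intro g h
    simp only [List.foldl_cons]
    exact ih _ (rows_foldl_cols color i j r2 r0 L g h)

lemma gget_foldl_rows (color : String) (i j r2 : Int) (W H : Nat) (L : List Int)
    (hL : ∀ c ∈ L, 0 ≤ c ∧ c < (W : Int)) :
    ∀ (R : List Int) (g : List (List String)),
    g.length = H → (∀ row ∈ g, row.length = W) → (∀ r ∈ R, 0 ≤ r ∧ r < (H : Int)) →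
    ∀ r' c' : Nat,
    gget (R.foldl (fun g r => L.foldl (fun g c =>
        if (r - i) ^ 2 + (c - j) ^ 2 ≤ r2 then setCell g r.toNat c.toNat color else g) g) g) r' c'
      = if (r' : Int) ∈ R ∧ (c' : Int) ∈ L ∧ ((r' : Int) - i) ^ 2 + ((c' : Int) - j) ^ 2 ≤ r2
          then color else gget g r' c' := by
  intro R
  induction R with
  | nil => simp
  | cons r0 R ih =>
    intro g hlen hrow hR r' c'
    obtain ⟨hr0, hr0H⟩ := hR r0 (List.mem_cons_self ..)
    simp only [List.foldl_cons]
    rw [ih _ (by rw [length_foldl_cols]; exact hlen)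
        (rows_foldl_cols color i j r2 r0 L g hrow)
        (fun r hr => hR r (List.mem_cons_of_mem _ hr)) r' c',
      gget_foldl_cols color i j r2 r0 W L g hrow hL hr0 (by omega) r' c']
    by_cases e1 : (r' : Int) ∈ R ∧ (c' : Int) ∈ L ∧ ((r' : Int) - i) ^ 2 + ((c' : Int) - j) ^ 2 ≤ r2
    · rw [if_pos e1, if_pos ⟨List.mem_cons_of_mem _ e1.1, e1.2⟩]
    · rw [if_neg e1]
      by_cases e2 : r' = r0.toNat ∧ (c' : Int) ∈ L ∧ (r0 - i) ^ 2 + ((c' : Int) - j) ^ 2 ≤ r2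
      · have hrr : (r' : Int) = r0 := by omega
        have hok : (r' : Int) ∈ r0 :: R ∧ (c' : Int) ∈ L ∧ ((r' : Int) - i) ^ 2 + ((c' : Int) - j) ^ 2 ≤ r2 :=
          ⟨by rw [hrr]; exact List.mem_cons_self .., e2.2.1, by rw [hrr]; exact e2.2.2⟩
        rw [if_pos e2, if_pos hok]
      · rw [if_neg e2, if_neg ?_]
        rintro ⟨ha, hb, hcnd⟩
        rcases List.mem_cons.1 ha with ha | ha
        · exact e2 ⟨by omega, hb, by rw [← ha]; exact hcnd⟩
        · exact e1 ⟨ha, hb, hcnd⟩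

lemma length_paintOne (no_r no_c r2 rad : Int) (color : String) (i j : Int)
    (g : List (List String)) : (paintOne no_r no_c r2 rad color i j g).length = g.length := by
  unfold paintOne; rw [length_foldl_rows]

lemma rows_paintOne {W : Nat} (no_r no_c r2 rad : Int) (color : String) (i j : Int)
    (g : List (List String)) (h : ∀ row ∈ g, row.length = W) :
    ∀ row ∈ paintOne no_r no_c r2 rad color i j g, row.length = W := by
  unfold paintOne; exact rows_foldl_rows color i j r2 (PySem.List.pyRange (max 0 (j - rad)) (min no_c (j + rad + 1)) 1) _ g h

lemma gget_paintOne (no_r no_c radius : Int) (color : String) (i j : Int)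
    (g : List (List String)) (hlen : g.length = no_r.toNat)
    (hrow : ∀ row ∈ g, row.length = no_c.toNat)
    (r' c' : Nat) (hr' : r' < no_r.toNat) (hc' : c' < no_c.toNat) :
    gget (paintOne no_r no_c (radius * radius) |radius| color i j g) r' c' =
      if ((r' : Int) - i) ^ 2 + ((c' : Int) - j) ^ 2 ≤ radius ^ 2 then color
      else gget g r' c' := by
  unfold paintOne
  rw [gget_foldl_rows color i j (radius * radius) no_c.toNat no_r.toNat _
      (fun c hc => by rw [PySem.List.mem_pyRange_one] at hc; omega) _ g hlen hrow
      (fun r hr => by rw [PySem.List.mem_pyRange_one] at hr; omega) r' c']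
  congr 1
  rw [eq_iff_iff]
  constructor
  · rintro ⟨_, _, h⟩
    rw [pow_two radius]; exact h
  · intro h
    have h1 : ((r' : Int) - i) ^ 2 ≤ radius ^ 2 := by nlinarith [sq_nonneg ((c' : Int) - j)]
    have h2 : ((c' : Int) - j) ^ 2 ≤ radius ^ 2 := by nlinarith [sq_nonneg ((r' : Int) - i)]
    have a1 : |(r' : Int) - i| ≤ |radius| := by
      nlinarith [abs_nonneg ((r' : Int) - i), abs_nonneg radius, sq_abs ((r' : Int) - i), sq_abs radius]
    have a2 : |(c' : Int) - j| ≤ |radius| := by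
      nlinarith [abs_nonneg ((c' : Int) - j), abs_nonneg radius, sq_abs ((c' : Int) - j), sq_abs radius]
    rw [abs_le] at a1 a2
    refine ⟨?_, ?_, by rw [pow_two radius] at h; exact h⟩
    · rw [PySem.List.mem_pyRange_one]; omega
    · rw [PySem.List.mem_pyRange_one]; omega

lemma gget_actions_fold (no_r no_c radius : Int) :
    ∀ (acts : List (String × Int × Int)) (g : List (List String)),
    g.length = no_r.toNat → (∀ row ∈ g, row.length = no_c.toNat) →
    ∀ r' c' : Nat, r' < no_r.toNat → c' < no_c.toNat →
    gget (acts.foldl (fun g a => paintOne no_r no_c (radius * radius) |radius| a.1 a.2.1 a.2.2 g) g) r' c'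
      = acts.foldl (fun ans a =>
          if ((r' : Int) - a.2.1) ^ 2 + ((c' : Int) - a.2.2) ^ 2 ≤ radius ^ 2 then a.1 else ans)
          (gget g r' c') := by
  intro acts
  induction acts with
  | nil => intro g _ _ r' c' _ _; rfl
  | cons a acts ih =>
    intro g hlen hrow r' c' hr' hc'
    simp only [List.foldl_cons]
    rw [ih _ (by rw [length_paintOne]; exact hlen) (rows_paintOne _ _ _ _ _ _ _ _ hrow) r' c' hr' hc',
      gget_paintOne no_r no_c radius a.1 a.2.1 a.2.2 g hlen hrow r' c' hr' hc']

lemma length_actions_fold (no_r no_c radius : Int) :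
    ∀ (acts : List (String × Int × Int)) (g : List (List String)),
    (acts.foldl (fun g a => paintOne no_r no_c (radius * radius) |radius| a.1 a.2.1 a.2.2 g) g).length
      = g.length := by
  intro acts
  induction acts with
  | nil => intro g; rfl
  | cons a acts ih => intro g; simp only [List.foldl_cons]; rw [ih, length_paintOne]

lemma rows_actions_fold {W : Nat} (no_r no_c radius : Int) :
    ∀ (acts : List (String × Int × Int)) (g : List (List String)), (∀ row ∈ g, row.length = W) →
    ∀ row ∈ acts.foldl (fun g a => paintOne no_r no_c (radius * radius) |radius| a.1 a.2.1 a.2.2 g) g,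
      row.length = W := by
  intro acts
  induction acts with
  | nil => intro g h; simpa
  | cons a acts ih =>
    intro g h
    simp only [List.foldl_cons]
    exact ih _ (rows_paintOne _ _ _ _ _ _ _ _ h)

theorem splash_spec : Claim_equal_splash := by
  intro no_r no_c radius actions _
  show splash no_r no_c radius actions = splash_alt no_r no_c radius actions
  have hA : splash no_r no_c radius actions =
      (PySem.List.pyRange 0 no_r 1).map (fun r => (PySem.List.pyRange 0 no_c 1).map
        (fun c => which_paint no_r no_c radius r c actions)) := by
    simp only [splash, PySem.List.foldl_append_singleton_eq_map, List.nil_append]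
  have hinitlen : ((PySem.List.pyRange 0 no_r 1).map
      (fun _ => List.replicate no_c.toNat ("." : String))).length = no_r.toNat := by
    simp [PySem.List.length_pyRange_one]
  have hinitrows : ∀ row ∈ (PySem.List.pyRange 0 no_r 1).map
      (fun _ => List.replicate no_c.toNat ("." : String)), row.length = no_c.toNat := by
    intro row hrow
    rcases List.mem_map.1 hrow with ⟨_, _, rfl⟩
    simp
  have haltlen : (splash_alt no_r no_c radius actions).length = no_r.toNat := by
    unfold splash_alt; rw [length_actions_fold]; exact hinitlen
  have haltrows : ∀ row ∈ splash_alt no_r no_c radius actions, row.length = no_c.toNat :=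
    rows_actions_fold no_r no_c radius actions _ hinitrows
  rw [hA]
  apply List.ext_getElem
  · rw [haltlen]; simp [PySem.List.length_pyRange_one]
  · intro k h1 h2
    have hk : k < no_r.toNat := by simpa [PySem.List.length_pyRange_one] using h1
    apply List.ext_getElem
    · rw [List.getElem_map, haltrows _ (List.getElem_mem h2)]
      simp [PySem.List.length_pyRange_one]
    · intro m hm1 hm2
      have hm : m < no_c.toNat := by
        rw [haltrows _ (List.getElem_mem h2)] at hm2; exact hm2
      have hkb : k < (splash_alt no_r no_c radius actions).length := by
        rw [haltlen]; exact hk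
      have hmb : m < ((splash_alt no_r no_c radius actions).getD k []).length := by
        rw [List.getD_eq_getElem _ _ hkb]; exact hm2
      have hR : (splash_alt no_r no_c radius actions)[k][m] =
          gget (splash_alt no_r no_c radius actions) k m := by
        rw [gget, List.getD_eq_getElem?_getD, List.getD_eq_getElem?_getD,
          List.getElem?_eq_getElem hkb, Option.getD_some,
          List.getElem?_eq_getElem hm2, Option.getD_some]
      rw [hR]
      have hG : gget (splash_alt no_r no_c radius actions) k m =
          actions.foldl (fun ans a =>
            if ((k : Int) - a.2.1) ^ 2 + ((m : Int) - a.2.2) ^ 2 ≤ radius ^ 2 then a.1 else ans)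
            "." := by
        unfold splash_alt
        rw [gget_actions_fold no_r no_c radius actions _ hinitlen hinitrows k m hk hm]
        congr 1
        have hkb2 : k < ((PySem.List.pyRange 0 no_r 1).map
            (fun _ => List.replicate no_c.toNat ("." : String))).length := by
          rw [hinitlen]; exact hk
        rw [gget, List.getD_eq_getElem?_getD, List.getD_eq_getElem?_getD,
          List.getElem?_eq_getElem hkb2, Option.getD_some, List.getElem_map,
          List.getElem?_eq_getElem (show m < (List.replicate no_c.toNat ("." : String)).length by
            simpa using hm),
          Option.getD_some, List.getElem_replicate]
      rw [hG]
      simp [which_paint, PySem.List.getElem_pyRange_one]
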